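-- pv_equiv track=rewrite | github.com/bauhaus93/fallout76_nukecode_guesser | guess_word.py | enum_possibilities
-- ===== SOURCE A (Python) =====
-- import string
--
-- def enum_possibilities(word):
--     blank_index = word.find("_")
--     if blank_index == -1:
--         return [word]
--     else:
--         words = []
--         for a in string.ascii_uppercase:
--             new_word = word [:blank_index] + a + word[blank_index + 1:]
--             words.extend(enum_possibilities(new_word))
--         return words
-- ===== SOURCE B (Python) =====
-- import string
--
-- def enum_possibilities(word):
--     # breadth-first: build every tuple of replacement letters, then fill the
--     # blanks of the word in one left-to-right pass per tuple
--     combos = [()]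
--     for _ in range(word.count("_")):
--         combos = [c + (a,) for c in combos for a in string.ascii_uppercase]
--     results = []
--     for combo in combos:
--         remaining = list(combo)
--         chars = []
--         for ch in word:
--             if ch == "_":
--                 chars.append(remaining.pop(0))
--             else:
--                 chars.append(ch)
--         results.append("".join(chars))
--     return results
-- ===== Notes on version B (the rewrite author's own statement) =====
-- stated objective: alternative
-- what changed: A's depth-first recursion (re-find the first '_' and re-splice the whole word for every branch) is replaced by a breadth-first build of all letter tuples followed by one left-to-right fill pass per tuple.
import Mathlib
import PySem

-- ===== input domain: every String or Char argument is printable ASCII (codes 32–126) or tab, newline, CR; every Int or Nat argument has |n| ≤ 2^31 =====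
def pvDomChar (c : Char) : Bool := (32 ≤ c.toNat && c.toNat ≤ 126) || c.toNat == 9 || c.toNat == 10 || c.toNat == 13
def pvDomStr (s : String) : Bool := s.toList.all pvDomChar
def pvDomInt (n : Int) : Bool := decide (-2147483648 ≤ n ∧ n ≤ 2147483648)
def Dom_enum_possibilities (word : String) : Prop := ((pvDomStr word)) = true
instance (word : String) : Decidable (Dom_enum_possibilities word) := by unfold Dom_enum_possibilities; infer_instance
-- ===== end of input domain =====

-- B replaces A's per-blank recursion (which re-scans and re-splices the whole word for every
-- branch) by one breadth-first table of letter tuples plus a single fill pass per tuple; objective: alternative.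

def upperChars : List Char := "ABCDEFGHIJKLMNOPQRSTUVWXYZ".toList

-- ===== PORT A =====
-- A's recursion, on code points; fuel = word length only makes the recursion total
-- (each recursive call removes one '_', and the number of '_' is at most the length).
def epAgo : Nat → List Char → List (List Char)
  | 0, w => [w]
  | fuel+1, w =>
    let bi := PySem.Chars.find w ['_']
    if bi = -1 then [w]
    else upperChars.foldl
      (fun words a =>
        words ++ epAgo fuel
          (PySem.Chars.slice w none (some bi) ++ [a] ++ PySem.Chars.slice w (some (bi + 1)) none))
      []

def enum_possibilities (word : String) : List String :=
  (epAgo word.toList.length word.toList).map String.ofList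

-- ===== PORT B =====
-- one step of the combo-building loop: combos = [c + (a,) for c in combos for a in ascii_uppercase]
def stepCombos (cs : List (List Char)) : List (List Char) :=
  cs.flatMap (fun c => upperChars.map (fun a => c ++ [a]))

-- the inner fill loop of Source B: consume one replacement letter per '_' (remaining.pop(0));
-- the empty-remaining branch is unreachable (combo length = number of blanks) and only totalizes it
def fillWord : List Char → List Char → List Char
  | [], _ => []
  | ch :: cs, remaining =>
    if ch = '_' then
      match remaining with
      | l :: ls => l :: fillWord cs ls
      | [] => []
    else ch :: fillWord cs remaining

def enum_possibilities_alt (word : String) : List String :=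
  let w := word.toList
  let combos := (List.range (PySem.Chars.count w ['_'])).foldl (fun cs _ => stepCombos cs) [[]]
  (combos.map (fun c => fillWord w c)).map String.ofList

-- ===== PRECONDITION & SPEC =====
def Spec_enum_possibilities (word : String) (out : List String) : Prop := out = enum_possibilities_alt word
instance (word : String) (out : List String) : Decidable (Spec_enum_possibilities word out) := by unfold Spec_enum_possibilities; infer_instance

-- ===== CLAIM (what is proved, stated in full; the proofs are below) =====
def Claim_equal_enum_possibilities : Prop := ∀ (word : String), Dom_enum_possibilities word → Spec_enum_possibilities word (enum_possibilities word)

-- ===== LEMMAS AND PROOFS =====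

-- the combo table of Source B, in the prepend form that matches A's leftmost-blank recursion
def tuplesL : Nat → List (List Char)
  | 0 => [[]]
  | n+1 => upperChars.flatMap (fun a => (tuplesL n).map (a :: ·))

lemma flatMap_sing (u : List Char) : u.flatMap (fun a => [[a]]) = u.map (fun a => [a]) := by
  induction u with
  | nil => rfl
  | cons x t ih => simp [ih]

lemma stepCombos_map_cons (a : Char) (l : List (List Char)) :
    stepCombos (l.map (a :: ·)) = (stepCombos l).map (a :: ·) := by
  simp [stepCombos, List.flatMap_map, List.map_flatMap, Function.comp_def, List.map_map]

lemma stepCombos_tuplesL (n : Nat) : stepCombos (tuplesL n) = tuplesL (n + 1) := by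
  induction n with
  | zero =>
    rw [tuplesL]
    show stepCombos [[]] = upperChars.flatMap (fun a => (tuplesL 0).map (a :: ·))
    simp [stepCombos, tuplesL, flatMap_sing]
  | succ n ih =>
    have hL : tuplesL (n+1) = upperChars.flatMap (fun a => (tuplesL n).map (a :: ·)) := by
      rw [tuplesL]
    have hT : tuplesL (n+1+1) = upperChars.flatMap (fun a => (tuplesL (n+1)).map (a :: ·)) := by
      rw [tuplesL]
    conv_lhs => rw [hL]
    conv_rhs => rw [hT, ← ih]
    show List.flatMap (fun c => List.map (fun x => c ++ [x]) upperChars)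
        (List.flatMap (fun a => List.map (fun x => a :: x) (tuplesL n)) upperChars) =
      List.flatMap (fun a => List.map (fun x => a :: x) (stepCombos (tuplesL n))) upperChars
    rw [List.flatMap_assoc]
    exact List.flatMap_congr (fun a _ => stepCombos_map_cons a (tuplesL n))

lemma foldl_step_range (k : Nat) :
    (List.range k).foldl (fun cs _ => stepCombos cs) [[]] = tuplesL k := by
  induction k with
  | zero => rfl
  | succ k ih => rw [List.range_succ, List.foldl_append, ih, List.foldl_cons, List.foldl_nil,
      stepCombos_tuplesL]

lemma count_go_singleton (c : Char) (s : List Char) :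
    ∀ (fuel acc : Nat), s.length ≤ fuel →
      PySem.Chars.count.go [c] fuel s acc = acc + s.count c := by
  induction s with
  | nil => intro fuel acc _; cases fuel <;> rw [PySem.Chars.count.go] <;> simp
  | cons x t ih =>
    intro fuel acc h
    cases fuel with
    | zero => simp at h
    | succ fuel =>
      have ht : t.length ≤ fuel := by simp only [List.length_cons] at h; omega
      rw [PySem.Chars.count.go]
      by_cases hx : x = c
      · rw [if_pos (by simp [List.isPrefixOf, hx])]
        simp only [List.length_singleton, List.drop_one, List.tail_cons]
        rw [ih fuel (acc + 1) ht]
        simp [hx]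
        omega
      · rw [if_neg (by simp [List.isPrefixOf]; intro h'; exact hx h'.symm)]
        rw [ih fuel acc ht]
        simp [hx]

lemma count_singleton (s : List Char) (c : Char) :
    PySem.Chars.count s [c] = s.count c := by
  simp only [PySem.Chars.count, List.isEmpty_cons, if_false, Bool.false_eq_true]
  simpa using count_go_singleton c s s.length 0 (le_refl _)

lemma fillWord_clean (p r ls : List Char) (hp : ∀ x ∈ p, x ≠ '_') :
    fillWord (p ++ r) ls = p ++ fillWord r ls := by
  induction p with
  | nil => rfl
  | cons x t ih =>
    have hx : x ≠ '_' := hp x (by simp)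
    simp only [List.cons_append, fillWord, if_neg hx]
    rw [ih (fun y hy => hp y (by simp [hy]))]

lemma fillWord_no_blank (w ls : List Char) (h : '_' ∉ w) :
    fillWord w ls = w := by
  have := fillWord_clean w [] ls (fun x hx hc => h (hc ▸ hx))
  simpa [fillWord] using this

lemma epAgo_eq (fuel : Nat) : ∀ (w : List Char), w.count '_' ≤ fuel →
    epAgo fuel w = (tuplesL (w.count '_')).map (fillWord w) := by
  induction fuel with
  | zero =>
    intro w h
    have hz : w.count '_' = 0 := by omega
    have hnm : '_' ∉ w := by
      rw [← List.count_eq_zero]; exact hz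
    rw [hz]
    simp [epAgo, tuplesL, fillWord_no_blank w [] hnm]
  | succ fuel ih =>
    intro w h
    by_cases hf : PySem.Chars.find w ['_'] = -1
    · have hnm : '_' ∉ w := by
        have := (PySem.Chars.find_eq_neg_one_iff w ['_']).mp hf
        intro hm; exact this ((List.singleton_infix_iff '_' w).mpr hm)
      have hz : w.count '_' = 0 := List.count_eq_zero.mpr hnm
      rw [hz]
      simp [epAgo, hf, tuplesL, fillWord_no_blank w [] hnm]
    · -- a blank exists at index nb
      have hge : 0 ≤ PySem.Chars.find w ['_'] := by
        have := PySem.Chars.neg_one_le_find w ['_']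
        omega
      obtain ⟨hpre, hmin⟩ := PySem.Chars.find_spec hge
      set nb := (PySem.Chars.find w ['_']).toNat with hnb
      -- decomposition of w
      obtain ⟨t, ht⟩ := hpre
      have hdrop : w.drop nb = '_' :: t := by simpa using ht.symm
      have hlt : nb < w.length := by
        by_contra hc
        rw [List.drop_eq_nil_of_le (by omega)] at hdrop
        simp at hdrop
      have ht' : t = w.drop (nb + 1) := by
        have h2 := congrArg List.tail hdrop
        rw [List.tail_drop] at h2
        simpa using h2.symm
      have hw : w = w.take nb ++ '_' :: w.drop (nb + 1) := by
        conv_lhs => rw [← List.take_append_drop nb w]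
        rw [hdrop, ht']
      -- the prefix before the first blank is clean
      have hclean : ∀ x ∈ w.take nb, x ≠ '_' := by
        intro x hx hc
        subst hc
        obtain ⟨i, hi, hgi⟩ := List.getElem_of_mem hx
        have hi' : i < nb := by
          have h3 := hi; simp [List.length_take] at h3; omega
        have hiw : i < w.length := by omega
        apply hmin i hi'
        have hwi : w[i]'hiw = '_' := by
          rw [← hgi]; simp [List.getElem_take]
        rw [List.drop_eq_getElem_cons hiw, hwi]
        exact ⟨w.drop (i + 1), rfl⟩
      have hcnt0 : (w.take nb).count '_' = 0 :=
        List.count_eq_zero.mpr (fun hm => hclean '_' hm rfl)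
      set csuf := (w.drop (nb + 1)).count '_' with hcsuf
      have hcw : w.count '_' = csuf + 1 := by
        conv_lhs => rw [hw]
        simp only [List.count_append, hcnt0, List.count_cons, beq_self_eq_true, if_pos]
        omega
      -- slices
      have hs1 : PySem.Chars.slice w none (some (PySem.Chars.find w ['_'])) = w.take nb := by
        rw [PySem.Chars.slice_eq_listSlice, PySem.List.slice_to _ hge]
      have hs2 : PySem.Chars.slice w (some (PySem.Chars.find w ['_'] + 1)) none = w.drop (nb + 1) := by
        rw [PySem.Chars.slice_eq_listSlice, PySem.List.slice_from _ (by omega)]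
        congr 1
        omega
      -- evaluate port A's step
      show (if PySem.Chars.find w ['_'] = -1 then [w]
        else upperChars.foldl (fun words a => words ++ epAgo fuel
          (PySem.Chars.slice w none (some (PySem.Chars.find w ['_'])) ++ [a] ++
            PySem.Chars.slice w (some (PySem.Chars.find w ['_'] + 1)) none)) []) = _
      rw [if_neg hf, hs1, hs2]
      rw [PySem.List.foldl_append_eq_flatMap
        (fun a => epAgo fuel (w.take nb ++ [a] ++ w.drop (nb + 1))) upperChars []]
      rw [List.nil_append, hcw]
      rw [show tuplesL (csuf + 1) = upperChars.flatMap (fun a => (tuplesL csuf).map (a :: ·))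
        from by rw [tuplesL]]
      rw [List.map_flatMap]
      refine List.flatMap_congr ?_
      intro a ha
      have hane : a ≠ '_' := by
        have hall : upperChars.all (fun x => x != '_') = true := by decide
        simpa using List.all_eq_true.mp hall a ha
      -- count of the new word
      have hcnew : (w.take nb ++ [a] ++ w.drop (nb + 1)).count '_' = csuf := by
        simp only [List.count_append, hcnt0, List.count_cons, List.count_nil]
        simp [hane, hcsuf]
      rw [ih _ (by omega), hcnew, List.map_map]
      refine List.map_congr_left ?_
      intro ls _
      show fillWord (w.take nb ++ [a] ++ w.drop (nb + 1)) ls = fillWord w (a :: ls)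
      conv_rhs => rw [hw]
      rw [List.append_assoc, fillWord_clean _ _ _ hclean, fillWord_clean _ _ _ hclean]
      congr 1
      show fillWord (a :: w.drop (nb + 1)) ls = fillWord ('_' :: w.drop (nb + 1)) (a :: ls)
      simp [fillWord, hane]

-- ===== VERDICT (by name: the statement is the Claim_ definition above) =====
theorem enum_possibilities_spec : Claim_equal_enum_possibilities := by
  intro word _
  show enum_possibilities word = enum_possibilities_alt word
  show (epAgo word.toList.length word.toList).map String.ofList =
    (((List.range (PySem.Chars.count word.toList ['_'])).foldl (fun cs _ => stepCombos cs)
      [[]]).map (fun c => fillWord word.toList c)).map String.ofList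
  rw [count_singleton, foldl_step_range,
    epAgo_eq word.toList.length word.toList (List.count_le_length)]
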